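-- pv_equiv track=rewrite | github.com/dbooth-boston/xltablediff | src/xltablediff/xltablediff.py | TrimAndPad
-- ===== SOURCE A (Python) =====
-- def TrimAndPad(rows):
--     ''' Trim trailing empty rows and columns, and pad
--     every row to have the same number of values.
--     Modifies the given rows of values in place.
--     '''
--     iLastRow = -1
--     jLastColumn = -1
--     for i in range(len(rows)):
--         row = rows[i]
--         # Look for the last non-empty cell in the row:
--         jLastThisRow = -1
--         for j in range(len(row)-1, -1, -1):
--             if row[j]:
--                 jLastThisRow = j
--                 if j > jLastColumn:
--                     jLastColumn = j
--                 break
--         if jLastThisRow >= 0: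
--             iLastRow = i
--             if jLastThisRow > jLastColumn:
--                 jLastColumn = jLastThisRow
--     nRows = iLastRow + 1
--     nColumns = jLastColumn + 1
--     del rows[nRows : ]
--     # Now pad (or trim) each row to the max number of non-empty columns.
--     for i in range(nRows):
--         row = rows[i]
--         if len(row) > nColumns:
--             # Trim a row with extra cells:
--             del row[ nColumns : ]
--         # Pad a row with too few cells:
--         padding = [ "" for j in range(len(row), nColumns) ]
--         row.extend(padding)
--     return rows
-- ===== SOURCE B (Python) =====
-- def _rstrip(row):
--     ''' Copy of row without its trailing falsy cells. '''
--     k = len(row)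
--     while k and not row[k - 1]:
--         k -= 1
--     return row[:k]
--
-- def TrimAndPad(rows):
--     ''' Right-strip every row first, drop the now-empty rows from the bottom,
--     take the table width as the longest stripped row, and rebuild each kept
--     row by padding its stripped form with "" up to that width.
--     Mutates `rows` in place (by wholesale reassignment) and returns it. '''
--     stripped = [_rstrip(row) for row in rows]
--     while stripped and not stripped[-1]:
--         stripped.pop()
--     width = 0
--     for r in stripped:
--         if len(r) > width:
--             width = len(r)
--     rows[:] = [r + [""] * (width - len(r)) for r in stripped]
--     return rows
-- ===== Notes on version B (the rewrite author's own statement) =====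
-- stated objective: alternative
-- what changed: Instead of A's fused index scan tracking (iLastRow, jLastColumn) and per-row trim/extend, B right-strips each row of its trailing falsy cells, pops now-empty rows off the bottom, takes the width as the longest stripped row, and rebuilds each kept row by padding its stripped form with empty strings.
import Mathlib
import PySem

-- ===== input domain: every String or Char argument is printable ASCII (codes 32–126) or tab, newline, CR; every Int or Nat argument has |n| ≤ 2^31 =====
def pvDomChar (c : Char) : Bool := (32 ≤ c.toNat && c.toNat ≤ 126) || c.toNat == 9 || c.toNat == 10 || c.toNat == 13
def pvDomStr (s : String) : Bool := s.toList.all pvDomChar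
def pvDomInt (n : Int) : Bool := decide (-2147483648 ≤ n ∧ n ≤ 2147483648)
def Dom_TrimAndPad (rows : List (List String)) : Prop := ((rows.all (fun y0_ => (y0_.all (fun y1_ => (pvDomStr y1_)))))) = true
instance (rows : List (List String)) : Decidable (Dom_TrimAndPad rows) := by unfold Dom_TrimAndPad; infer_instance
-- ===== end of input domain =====

-- B rebuilds the table from right-stripped rows (strip, pop empty tails, width = longest
-- stripped row, pad back) instead of A's fused index scan; equivalence is about the RETURN
-- value only (both Pythons mutate `rows` in place, but B replaces the inner row lists).

-- ===== PORT A =====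
-- inner `for j in range(len(row)-1,-1,-1)` loop with break: scan row.reverse carrying index j
def pvAInner : List String → Int → Int → Int × Int
  | [], _, jLast => (-1, jLast)
  | c :: rest, j, jLast =>
    if c ≠ "" then (j, if j > jLast then j else jLast)
    else pvAInner rest (j - 1) jLast

-- outer loop over enumerated rows carrying (iLastRow, jLastColumn)
def pvAOuter : List (List String × Nat) → Int × Int → Int × Int
  | [], s => s
  | (row, i) :: rest, (iLast, jLast) =>
    let p := pvAInner row.reverse ((row.length : Int) - 1) jLast
    let jThis := p.1
    let jLast' := p.2
    let s' : Int × Int :=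
      if jThis ≥ 0 then ((i : Int), if jThis > jLast' then jThis else jLast')
      else (iLast, jLast')
    pvAOuter rest s'

-- `del row[nColumns:]` then `row.extend(padding)`
def pvAPad (row : List String) (nColumns : Nat) : List String :=
  let row' := if row.length > nColumns then row.take nColumns else row
  row' ++ List.replicate (nColumns - row'.length) ""

def TrimAndPad (rows : List (List String)) : List (List String) :=
  let s := pvAOuter (rows.zipIdx 0) (-1, -1)
  let nRows := (s.1 + 1).toNat
  let nColumns := (s.2 + 1).toNat
  (rows.take nRows).map (fun row => pvAPad row nColumns)

-- ===== PORT B =====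
-- `_rstrip`'s `while k and not row[k-1]: k -= 1`: scan the reversed row, k counts down
def pvRstripK : List String → Nat → Nat
  | [], k => k
  | c :: rest, k => if c == "" then pvRstripK rest (k - 1) else k

-- `_rstrip(row) = row[:k]`
def pvRstrip (row : List String) : List String :=
  row.take (pvRstripK row.reverse row.length)

-- `while stripped and not stripped[-1]: stripped.pop()`, acting on the reversed list
def pvPop : List (List String) → List (List String)
  | [] => []
  | r :: rest => if r.isEmpty then pvPop rest else r :: rest

def TrimAndPad_alt (rows : List (List String)) : List (List String) :=
  let stripped := (pvPop ((rows.map pvRstrip).reverse)).reverse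
  let width := stripped.foldl (fun w r => if r.length > w then r.length else w) 0
  stripped.map (fun r => r ++ List.replicate (width - r.length) "")

-- ===== PRECONDITION & SPEC =====
def Spec_TrimAndPad (rows : List (List String)) (out : List (List String)) : Prop := out = TrimAndPad_alt rows
instance (rows : List (List String)) (out : List (List String)) : Decidable (Spec_TrimAndPad rows out) := by unfold Spec_TrimAndPad; infer_instance

-- ===== CLAIM (what is proved, stated in full; the proofs are below) =====
def Claim_equal_TrimAndPad : Prop := ∀ (rows : List (List String)), Dom_TrimAndPad rows → Spec_TrimAndPad rows (TrimAndPad rows)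

-- ===== LEMMAS AND PROOFS =====

-- index of the last non-empty cell of a row (-1 if none)
def lastNE : List String → Int
  | [] => -1
  | c :: rest =>
    let r := lastNE rest
    if r ≥ 0 then r + 1 else if c ≠ "" then 0 else -1

-- index of the last row containing a non-empty cell (-1 if none)
def lastRowIdx : List (List String) → Int
  | [] => -1
  | row :: rest =>
    let r := lastRowIdx rest
    if r ≥ 0 then r + 1 else if row.any (fun c => c != "") then 0 else -1

def colMax (rows : List (List String)) (j : Int) : Int :=
  rows.foldl (fun n row => max n (lastNE row)) j

theorem lastNE_ge : ∀ (row : List String), -1 ≤ lastNE row := by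
  intro row
  induction row with
  | nil => simp [lastNE]
  | cons c rest ih => simp only [lastNE]; split_ifs <;> omega

theorem lastNE_lt : ∀ (row : List String), lastNE row < (row.length : Int) := by
  intro row
  induction row with
  | nil => simp [lastNE]
  | cons c rest ih =>
    simp only [lastNE, List.length_cons]
    split_ifs <;> push_cast <;> omega

theorem lastRowIdx_ge : ∀ (rows : List (List String)), -1 ≤ lastRowIdx rows := by
  intro rows
  induction rows with
  | nil => simp [lastRowIdx]
  | cons r rest ih => simp only [lastRowIdx]; split_ifs <;> omega

theorem lastRowIdx_lt : ∀ (rows : List (List String)), lastRowIdx rows < (rows.length : Int) := by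
  intro rows
  induction rows with
  | nil => simp [lastRowIdx]
  | cons r rest ih =>
    simp only [lastRowIdx, List.length_cons]
    split_ifs <;> push_cast <;> omega

theorem lastNE_nonneg_iff (row : List String) :
    0 ≤ lastNE row ↔ row.any (fun c => c != "") = true := by
  induction row with
  | nil => simp [lastNE]
  | cons c rest ih =>
    simp only [lastNE, List.any_cons, Bool.or_eq_true, bne_iff_ne]
    have := lastNE_ge rest
    split_ifs with h1 h2 <;> simp_all <;> omega

theorem lastNE_concat (rest : List String) (c : String) :
    lastNE (rest ++ [c]) = if c ≠ "" then (rest.length : Int) else lastNE rest := by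
  induction rest with
  | nil => simp [lastNE]
  | cons x xs ih =>
    simp only [List.cons_append, lastNE, ih, List.length_cons]
    have := lastNE_ge xs
    split_ifs <;> push_cast <;> omega

theorem lastRowIdx_concat (rest : List (List String)) (row : List String) :
    lastRowIdx (rest ++ [row]) =
      if row.any (fun c => c != "") then (rest.length : Int) else lastRowIdx rest := by
  induction rest with
  | nil => simp [lastRowIdx]
  | cons x xs ih =>
    simp only [List.cons_append, lastRowIdx, ih, List.length_cons]
    have := lastRowIdx_ge xs
    split_ifs <;> push_cast <;> omega

-- A's inner loop computes the last non-empty index and maxes it into jLast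
theorem pvAInner_eq (row : List String) (jLast : Int) (h : -1 ≤ jLast) :
    pvAInner row.reverse ((row.length : Int) - 1) jLast
      = (lastNE row, max jLast (lastNE row)) := by
  induction row using List.reverseRecOn generalizing jLast with
  | nil => simp [pvAInner, lastNE]; omega
  | append_singleton rest c ih =>
    rw [List.reverse_append]
    simp only [List.reverse_cons, List.reverse_nil, List.nil_append, List.singleton_append,
      pvAInner, List.length_append, List.length_singleton, lastNE_concat]
    by_cases hc : c ≠ ""
    · simp only [if_pos hc, Prod.mk.injEq]
      push_cast
      split_ifs <;> omega
    · simp only [if_neg hc]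
      rw [show ((rest.length + 1 : Nat) : Int) - 1 - 1 = (rest.length : Int) - 1 by push_cast; omega]
      exact ih jLast h

-- lastRowIdx unfolded on a cons cell
theorem lastRowIdx_cons (row : List String) (rest : List (List String)) :
    lastRowIdx (row :: rest) =
      if 0 ≤ lastRowIdx rest then lastRowIdx rest + 1
      else if row.any (fun c => c != "") then 0 else -1 := by
  simp [lastRowIdx]

-- A's fused outer loop, characterized by the two independent quantities
theorem pvAOuter_eq (rows : List (List String)) :
    ∀ (k : Nat) (iLast jLast : Int), -1 ≤ jLast →
    pvAOuter (rows.zipIdx k) (iLast, jLast)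
      = ((if 0 ≤ lastRowIdx rows then (k : Int) + lastRowIdx rows else iLast),
         colMax rows jLast) := by
  induction rows with
  | nil => intro k iLast jLast h; simp [pvAOuter, lastRowIdx, colMax]
  | cons row rest ih =>
    intro k iLast jLast h
    simp only [List.zipIdx_cons, pvAOuter]
    rw [pvAInner_eq row jLast h]
    simp only
    have hmax : -1 ≤ max jLast (lastNE row) := by omega
    have hrge := lastRowIdx_ge rest
    have hcol : colMax (row :: rest) jLast = colMax rest (max jLast (lastNE row)) := by
      simp [colMax]
    by_cases hr : 0 ≤ lastNE row
    · have hgt : ¬ (lastNE row > max jLast (lastNE row)) := by omega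
      simp only [ge_iff_le, if_pos hr, if_neg hgt]
      rw [ih (k+1) (k : Int) (max jLast (lastNE row)) hmax]
      have hany : row.any (fun c => c != "") = true := (lastNE_nonneg_iff row).mp hr
      rw [hcol, lastRowIdx_cons, if_pos hany]
      refine Prod.ext ?_ rfl
      simp only
      by_cases hc : 0 ≤ lastRowIdx rest
      · simp only [if_pos hc]
        rw [if_pos (show (0:Int) ≤ lastRowIdx rest + 1 by omega)]
        push_cast; omega
      · simp only [if_neg hc]
        rw [if_pos (show (0:Int) ≤ (0:Int) by omega)]
        omega
    · simp only [ge_iff_le, if_neg hr]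
      rw [ih (k+1) iLast (max jLast (lastNE row)) hmax]
      have hany : ¬ ((row.any fun c => c != "") = true) :=
        fun hh => hr ((lastNE_nonneg_iff row).mpr hh)
      rw [hcol, lastRowIdx_cons, if_neg hany]
      refine Prod.ext ?_ rfl
      simp only
      by_cases hc : 0 ≤ lastRowIdx rest
      · simp only [if_pos hc]
        rw [if_pos (show (0:Int) ≤ lastRowIdx rest + 1 by omega)]
        push_cast; omega
      · simp only [if_neg hc]
        rw [if_neg (show ¬ (0:Int) ≤ (-1:Int) by omega)]

-- B's strip index equals lastNE + 1
theorem pvRstripK_eq (row : List String) :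
    (pvRstripK row.reverse row.length : Int) = lastNE row + 1 := by
  induction row using List.reverseRecOn with
  | nil => simp [pvRstripK, lastNE]
  | append_singleton rest c ih =>
    rw [List.reverse_append]
    simp only [List.reverse_cons, List.reverse_nil, List.nil_append, List.singleton_append,
      pvRstripK, List.length_append, List.length_singleton, lastNE_concat]
    by_cases hc : c = ""
    · subst hc
      simp only [beq_self_eq_true, if_pos, ne_eq, not_true_eq_false,
        Nat.add_sub_cancel]
      simpa using ih
    · rw [if_neg (by simpa using hc), if_pos hc]
      push_cast; omega

theorem pvRstrip_len (row : List String) :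
    (pvRstrip row).length = (lastNE row + 1).toNat := by
  unfold pvRstrip
  rw [List.length_take]
  have h1 := pvRstripK_eq row
  have h2 := lastNE_lt row
  have h3 := lastNE_ge row
  omega

-- what _rstrip throws away is exactly a block of empty cells
theorem lastNE_drop (row : List String) :
    row.drop (lastNE row + 1).toNat
      = List.replicate (row.length - (lastNE row + 1).toNat) "" := by
  induction row using List.reverseRecOn with
  | nil => simp
  | append_singleton rest c ih =>
    by_cases hc : c = ""
    · subst hc
      rw [lastNE_concat]
      simp only [ne_eq, not_true_eq_false, if_false]
      have hlt := lastNE_lt rest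
      have hge := lastNE_ge rest
      rw [List.drop_append_of_le_length (by omega)]
      rw [List.length_append, List.length_singleton]
      rw [show rest.length + 1 - (lastNE rest + 1).toNat
            = (rest.length - (lastNE rest + 1).toNat) + 1 by omega]
      rw [List.replicate_succ']
      rw [ih]
    · rw [lastNE_concat, if_pos hc]
      have : ((rest.length : Int) + 1).toNat = rest.length + 1 := by omega
      rw [this]
      simp

theorem pvRstrip_drop (row : List String) :
    row.drop (pvRstripK row.reverse row.length)
      = List.replicate (row.length - (pvRstrip row).length) "" := by
  rw [pvRstrip_len]
  have hk : pvRstripK row.reverse row.length = (lastNE row + 1).toNat := by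
    have := pvRstripK_eq row; omega
  rw [hk]
  exact lastNE_drop row

theorem pvRstrip_append (row : List String) :
    pvRstrip row ++ List.replicate (row.length - (pvRstrip row).length) "" = row := by
  conv_rhs => rw [← List.take_append_drop (pvRstripK row.reverse row.length) row]
  rw [pvRstrip_drop]
  rfl

theorem pvRstrip_eq_nil_iff (row : List String) :
    pvRstrip row = [] ↔ row.any (fun c => c != "") = false := by
  rw [← List.length_eq_zero_iff, pvRstrip_len]
  have h := lastNE_ge row
  constructor
  · intro hl
    by_contra hne
    have : 0 ≤ lastNE row := (lastNE_nonneg_iff row).mpr (by simpa using hne)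
    omega
  · intro hfalse
    have : ¬ 0 ≤ lastNE row := fun hge => by
      rw [(lastNE_nonneg_iff row).mp hge] at hfalse; simp at hfalse
    omega

theorem drop_no_truthy (rows : List (List String)) :
    ∀ row ∈ rows.drop (lastRowIdx rows + 1).toNat, row.any (fun c => c != "") = false := by
  induction rows using List.reverseRecOn with
  | nil => intro row hr; simp at hr
  | append_singleton rest r ih =>
    rw [lastRowIdx_concat]
    by_cases hr : r.any (fun c => c != "") = true
    · rw [if_pos hr]
      intro row hm
      rw [show ((rest.length : Int) + 1).toNat = rest.length + 1 by omega] at hm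
      rw [List.drop_eq_nil_of_le (by simp)] at hm
      cases hm
    · rw [if_neg hr]
      intro row hm
      have hlt := lastRowIdx_lt rest
      have hge := lastRowIdx_ge rest
      rw [List.drop_append_of_le_length (by omega)] at hm
      rcases List.mem_append.mp hm with h1 | h2
      · exact ih row h1
      · rcases List.mem_singleton.mp h2 with rfl
        simpa using hr

-- stripping then popping empty rows from the bottom = stripping the kept prefix
theorem pvPop_eq_take (rows : List (List String)) :
    pvPop ((rows.map pvRstrip).reverse)
      = (((rows.take (lastRowIdx rows + 1).toNat).map pvRstrip)).reverse := by
  induction rows using List.reverseRecOn with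
  | nil => simp [pvPop, lastRowIdx]
  | append_singleton rest r ih =>
    rw [List.map_append, List.reverse_append, lastRowIdx_concat]
    simp only [List.map_cons, List.map_nil, List.reverse_cons, List.reverse_nil,
      List.nil_append, List.singleton_append, pvPop]
    by_cases hr : r.any (fun c => c != "") = true
    · have hne : ¬ (pvRstrip r).isEmpty = true := by
        rw [List.isEmpty_iff]
        intro hnil
        rw [(pvRstrip_eq_nil_iff r).mp hnil] at hr
        simp at hr
      rw [if_neg hne, if_pos hr]
      rw [show ((rest.length : Int) + 1).toNat = rest.length + 1 by omega]
      rw [List.take_of_length_le (by simp)]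
      rw [List.map_append, List.reverse_append]
      simp
    · have hnil : pvRstrip r = [] := (pvRstrip_eq_nil_iff r).mpr (by simpa using hr)
      rw [hnil]
      simp only [List.isEmpty_nil, if_true, if_neg hr]
      rw [ih]
      have hlt := lastRowIdx_lt rest
      have hge := lastRowIdx_ge rest
      rw [List.take_append_of_le_length (by omega)]

-- B's width loop over stripped rows, against colMax
theorem width_fold_eq (rows : List (List String)) :
    ∀ (a : Nat),
      (rows.map pvRstrip).foldl (fun w r => if r.length > w then r.length else w) a
        = (colMax rows ((a : Int) - 1) + 1).toNat := by
  induction rows with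
  | nil => intro a; simp only [List.map_nil, List.foldl_nil, colMax, List.foldl_nil]; omega
  | cons row rest ih =>
    intro a
    simp only [List.map_cons, List.foldl_cons]
    rw [ih]
    have hL : ((pvRstrip row).length : Int) = lastNE row + 1 := by
      rw [pvRstrip_len]
      have := lastNE_ge row
      omega
    have hcol : colMax (row :: rest) ((a : Int) - 1)
        = colMax rest (max ((a : Int) - 1) (lastNE row)) := by simp [colMax]
    rw [hcol]
    have harg : ((if (pvRstrip row).length > a then (pvRstrip row).length else a : Nat) : Int) - 1
        = max ((a : Int) - 1) (lastNE row) := by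
      by_cases hgt : (pvRstrip row).length > a
      · rw [if_pos hgt]; omega
      · rw [if_neg hgt]; omega
    rw [harg]

-- folding the width over all-nil rows is the identity
theorem width_fold_nil (s : List (List String)) (a : Nat)
    (h : ∀ r ∈ s, r = ([] : List String)) :
    s.foldl (fun w r => if r.length > w then r.length else w) a = a := by
  induction s generalizing a with
  | nil => rfl
  | cons r rest ih =>
    rw [List.foldl_cons, h r List.mem_cons_self]
    simp only [List.length_nil]
    rw [if_neg (by omega)]
    exact ih a (fun r' hr' => h r' (List.mem_cons_of_mem _ hr'))

-- every row's lastNE is below colMax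
theorem colMax_ge_acc (rows : List (List String)) : ∀ j, j ≤ colMax rows j := by
  induction rows with
  | nil => intro j; simp [colMax]
  | cons r rest ih =>
    intro j
    have := ih (max j (lastNE r))
    simp only [colMax, List.foldl_cons] at *
    omega

theorem lastNE_le_colMax (rows : List (List String)) :
    ∀ j, ∀ row ∈ rows, lastNE row ≤ colMax rows j := by
  induction rows with
  | nil => intro j row hr; cases hr
  | cons r rest ih =>
    intro j row hr
    rcases List.mem_cons.mp hr with heq | hr
    · subst heq
      have := colMax_ge_acc rest (max j (lastNE row))
      simp only [colMax, List.foldl_cons] at *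
      omega
    · have := ih (max j (lastNE r)) row hr
      simpa [colMax] using this

-- per-row: A's trim-or-pad equals "take n of row padded to n"
theorem pad_eq (row : List String) (n : Nat) :
    pvAPad row n = (row ++ List.replicate n "").take n := by
  unfold pvAPad
  by_cases h : row.length > n
  · simp only [if_pos h]
    rw [List.take_append]
    rw [Nat.sub_eq_zero_of_le (Nat.le_of_lt h)]
    simp only [List.take_replicate]
    congr 1
    simp [List.length_take, Nat.min_eq_left (Nat.le_of_lt h)]
  · simp only [if_neg h]
    rw [List.take_append]
    rw [List.take_of_length_le (by omega), List.take_replicate]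
    congr 2
    omega

-- per-row: A's trim-or-pad equals B's strip-and-pad (when the row fits the width)
theorem pad_eq_strip (row : List String) (n : Nat)
    (h : (pvRstrip row).length ≤ n) :
    pvAPad row n = pvRstrip row ++ List.replicate (n - (pvRstrip row).length) "" := by
  rw [pad_eq]
  conv_lhs => rw [← pvRstrip_append row]
  rw [List.append_assoc, ← List.replicate_add]
  rw [List.take_append, List.take_of_length_le h, List.take_replicate]
  congr 2
  have hlen : (pvRstrip row).length ≤ row.length := by
    unfold pvRstrip; rw [List.length_take]; omega
  omega

-- ===== VERDICT (by name: the statement is the Claim_ definition above) =====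
theorem TrimAndPad_spec : Claim_equal_TrimAndPad := by
  intro rows _
  unfold Spec_TrimAndPad TrimAndPad TrimAndPad_alt
  simp only
  rw [pvAOuter_eq rows 0 (-1) (-1) (by omega)]
  rw [pvPop_eq_take, List.reverse_reverse]
  have hge := lastRowIdx_ge rows
  have h1 : ((if 0 ≤ lastRowIdx rows then ((0:Nat):Int) + lastRowIdx rows else -1) + 1).toNat
      = (lastRowIdx rows + 1).toNat := by split_ifs <;> simp <;> omega
  simp only
  rw [h1]
  set nR := (lastRowIdx rows + 1).toNat with hnR
  -- width = nColumns
  have hsplit : rows.map pvRstrip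
      = (rows.take nR).map pvRstrip ++ (rows.drop nR).map pvRstrip := by
    rw [← List.map_append, List.take_append_drop]
  have hzero : ∀ r ∈ (rows.drop nR).map pvRstrip, r = ([] : List String) := by
    intro r hr
    rcases List.mem_map.mp hr with ⟨row, hrow, rfl⟩
    exact (pvRstrip_eq_nil_iff row).mpr (drop_no_truthy rows row hrow)
  have hwidth : ((rows.take nR).map pvRstrip).foldl
        (fun w r => if r.length > w then r.length else w) 0
      = (colMax rows (-1) + 1).toNat := by
    have h2 := width_fold_eq rows 0
    rw [hsplit, List.foldl_append] at h2
    rw [width_fold_nil _ _ hzero] at h2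
    simpa using h2
  rw [hwidth]
  rw [List.map_map]
  apply List.map_congr_left
  intro row hrow
  have hmem : row ∈ rows := List.mem_of_mem_take hrow
  have hle : (pvRstrip row).length ≤ (colMax rows (-1) + 1).toNat := by
    have h3 := lastNE_le_colMax rows (-1) row hmem
    have h4 := lastNE_ge row
    have h5 := colMax_ge_acc rows (-1)
    rw [pvRstrip_len]
    omega
  exact pad_eq_strip row _ hle
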